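-- pv_equiv track=rewrite | github.com/danielnrainer/CIVET | src/utils/cif_dictionary_manager.py | _is_field_in_loop
-- ===== SOURCE A (Python) =====
-- from typing import Dict, List, Optional, Set, Tuple, Any
--
-- def _is_field_in_loop(cif_content: str, field_list: List[str]) -> bool:
--     """Check if any of the fields in the list are part of a loop"""
--     lines = cif_content.split('\n')
--     in_loop = False
--
--     for line in lines:
--         line_stripped = line.strip()
--         if line_stripped.startswith('loop_'):
--             in_loop = True
--         elif in_loop and line_stripped.startswith('_'):
--             # Field in loop header
--             if any(field in line_stripped for field in field_list):
--                 return True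
--         elif in_loop and line_stripped and not line_stripped.startswith('_') and not line_stripped.startswith('#'):
--             # Data line - end of loop header
--             in_loop = False
--         elif not line_stripped or line_stripped.startswith('#'):
--             # Empty line or comment - might end loop
--             in_loop = False
--
--     return False
-- ===== SOURCE B (Python) =====
-- from typing import List
--
-- def _is_field_in_loop(cif_content: str, field_list: List[str]) -> bool:
--     """Two-phase: first collect all loop-header lines, then one membership test."""
--     lines = cif_content.split('\n')
--     n = len(lines)
--     headers = []
--     i = 0
--     while i < n:
--         s = lines[i].strip()
--         i += 1
--         if s.startswith('loop_'):
--             # header mode: consume the following header lines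
--             while i < n:
--                 t = lines[i].strip()
--                 i += 1
--                 if t.startswith('loop_'):
--                     continue
--                 if t.startswith('_'):
--                     headers.append(t)
--                     continue
--                 break  # data / empty / comment line ends the header block
--     return any(field in h for h in headers for field in field_list)
-- ===== Notes on version B (the rewrite author's own statement) =====
-- stated objective: simpler
-- what changed: Replaced A's single pass with an in_loop flag and inline early-return test by a two-phase decomposition: first collect all loop-header lines with an explicit search/header two-loop scan, then one any() membership test over the collected headers.
import Mathlib
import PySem

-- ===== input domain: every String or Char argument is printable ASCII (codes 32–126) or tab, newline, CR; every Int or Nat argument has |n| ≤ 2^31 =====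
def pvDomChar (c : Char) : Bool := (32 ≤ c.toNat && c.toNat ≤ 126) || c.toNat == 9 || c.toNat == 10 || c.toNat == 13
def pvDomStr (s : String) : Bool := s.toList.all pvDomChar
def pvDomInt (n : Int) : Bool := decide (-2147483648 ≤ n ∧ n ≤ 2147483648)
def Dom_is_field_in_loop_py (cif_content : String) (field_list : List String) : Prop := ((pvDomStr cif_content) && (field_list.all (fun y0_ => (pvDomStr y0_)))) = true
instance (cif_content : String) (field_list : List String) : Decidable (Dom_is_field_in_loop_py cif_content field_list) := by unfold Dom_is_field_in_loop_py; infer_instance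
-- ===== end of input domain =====

-- B replaces A's in_loop flag state machine by a two-phase decomposition: collect all
-- loop-header lines first, then one membership test (objective: simpler; same cost).

-- ===== PORT A =====
-- `any(field in line_stripped for field in field_list)`
def pvAnyField (field_list : List String) (s : String) : Bool :=
  field_list.any (fun field => PySem.Str.isIn field s)

-- the `for line in lines` loop with its early return, state = in_loop
def pvLoopA (field_list : List String) : List String → Bool → Bool
  | [], _ => false
  | line :: rest, in_loop =>
    let s := PySem.Str.strip line
    if PySem.Str.startswith s "loop_" then pvLoopA field_list rest true
    else if in_loop && PySem.Str.startswith s "_" then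
      (if pvAnyField field_list s then true else pvLoopA field_list rest in_loop)
    else if in_loop && !(s == "") && !(PySem.Str.startswith s "_") && !(PySem.Str.startswith s "#") then
      pvLoopA field_list rest false
    else if s == "" || PySem.Str.startswith s "#" then pvLoopA field_list rest false
    else pvLoopA field_list rest in_loop

def is_field_in_loop_py (cif_content : String) (field_list : List String) : Bool :=
  pvLoopA field_list ((PySem.Str.split? cif_content "\n").getD []) false  -- split? is some: sep "\n" is non-empty

-- ===== PORT B =====
mutual
-- outer while loop: searching for a `loop_` line
def pvSearchB : List String → List String
  | [] => []
  | line :: rest =>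
    if PySem.Str.startswith (PySem.Str.strip line) "loop_" then pvHeaderB rest
    else pvSearchB rest
-- inner while loop: collecting header lines after a `loop_`
def pvHeaderB : List String → List String
  | [] => []
  | line :: rest =>
    let t := PySem.Str.strip line
    if PySem.Str.startswith t "loop_" then pvHeaderB rest
    else if PySem.Str.startswith t "_" then t :: pvHeaderB rest
    else pvSearchB rest
end

def is_field_in_loop_py_alt (cif_content : String) (field_list : List String) : Bool :=
  (pvSearchB ((PySem.Str.split? cif_content "\n").getD [])).any
    (fun h => field_list.any (fun field => PySem.Str.isIn field h))

-- ===== PRECONDITION & SPEC =====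
def Spec_is_field_in_loop_py (cif_content : String) (field_list : List String) (out : Bool) : Prop := out = is_field_in_loop_py_alt cif_content field_list
instance (cif_content : String) (field_list : List String) (out : Bool) : Decidable (Spec_is_field_in_loop_py cif_content field_list out) := by unfold Spec_is_field_in_loop_py; infer_instance

-- ===== CLAIM (what is proved, stated in full; the proofs are below) =====
def Claim_equal_is_field_in_loop_py : Prop := ∀ (cif_content : String) (field_list : List String), Dom_is_field_in_loop_py cif_content field_list → Spec_is_field_in_loop_py cif_content field_list (is_field_in_loop_py cif_content field_list)

-- ===== LEMMAS AND PROOFS =====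
theorem pvLoopA_eq (field_list : List String) :
    ∀ lines : List String,
      pvLoopA field_list lines true = (pvHeaderB lines).any (pvAnyField field_list) ∧
      pvLoopA field_list lines false = (pvSearchB lines).any (pvAnyField field_list) := by
  intro lines
  induction lines with
  | nil => simp [pvLoopA, pvSearchB, pvHeaderB]
  | cons line rest ih =>
    obtain ⟨ihT, ihF⟩ := ih
    constructor
    · show pvLoopA field_list (line :: rest) true = _
      rw [pvLoopA, pvHeaderB]
      split_ifs <;> simp_all [Bool.or_comm]
    · show pvLoopA field_list (line :: rest) false = _
      rw [pvLoopA, pvSearchB]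
      split_ifs <;> simp_all

-- ===== VERDICT (by name: the statement is the Claim_ definition above) =====
theorem is_field_in_loop_py_spec : Claim_equal_is_field_in_loop_py := by
  intro cif_content field_list _
  show is_field_in_loop_py cif_content field_list = is_field_in_loop_py_alt cif_content field_list
  unfold is_field_in_loop_py is_field_in_loop_py_alt
  rw [(pvLoopA_eq field_list ((PySem.Str.split? cif_content "\n").getD [])).2]
  rfl
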